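-- pv_equiv track=rewrite | github.com/neilneil2000/Advent-of-code-2022 | Day 18/day_eighteen.py | break_into_sets
-- ===== SOURCE A (Python) =====
-- def get_neighbours(location: tuple) -> set:
--     """Return set of all neighbouring locations"""
--     x, y, z = location
--     neighbours = set()
--     if x > -1:
--         neighbours.add((x - 1, y, z))
--     if x < 23:
--         neighbours.add((x + 1, y, z))
--     if y > -1:
--         neighbours.add((x, y - 1, z))
--     if y < 23:
--         neighbours.add((x, y + 1, z))
--     if z > -1:
--         neighbours.add((x, y, z - 1))
--     if z < 23:
--         neighbours.add((x, y, z + 1))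
--     return neighbours
--
-- def find_neighbours_in_set(cube_of_interest, set_of_cubes):
--     """Returns subset of 'set_of_cubes' which are neighbours of 'cube_of_interest'"""
--     neighbours = get_neighbours(cube_of_interest)
--     return neighbours.intersection(set_of_cubes)
--
-- def recursive_loop(current_set, cubes, current_cube):
--     neighbours = find_neighbours_in_set(current_cube, cubes)
--     current_set.update(neighbours)
--     cubes.difference_update(neighbours)
--     for neighbour in neighbours:
--         recursive_loop(current_set, cubes, neighbour)
--
-- def break_into_sets(cubes: set):
--     """Return list of sets where each set is a contiguous space"""
--     cube_sets = []
--     while cubes: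
--         current_cube = cubes.pop()
--         current_set = {current_cube}
--         recursive_loop(current_set, cubes, current_cube)
--         cube_sets.append(current_set)
--     return cube_sets
-- ===== SOURCE B (Python) =====
-- def _bounded_neighbours(cube):
--     """The six axis-aligned neighbours as a list, each kept only if the
--     coordinate it moved stays inside the wall it moved towards."""
--     x, y, z = cube
--     table = (
--         ((x - 1, y, z), x - 1, True), ((x + 1, y, z), x + 1, False),
--         ((x, y - 1, z), y - 1, True), ((x, y + 1, z), y + 1, False),
--         ((x, y, z - 1), z - 1, True), ((x, y, z + 1), z + 1, False),
--     )
--     return [nb for nb, moved, down in table if (moved >= -1 if down else moved <= 23)]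
--
--
-- def break_into_sets(cubes: set):
--     """Return list of sets where each set is a contiguous space.
--
--     Iterative flood fill: an explicit stack replaces the recursion."""
--     cube_sets = []
--     while cubes:
--         seed = cubes.pop()
--         component = {seed}
--         stack = [seed]
--         while stack:
--             cube = stack.pop()
--             found = [nb for nb in _bounded_neighbours(cube) if nb in cubes]
--             component.update(found)
--             cubes.difference_update(found)
--             stack.extend(reversed(found))
--         cube_sets.append(component)
--     return cube_sets
-- ===== Notes on version B (the rewrite author's own statement) =====
-- stated objective: alternative
-- what changed: The recursive flood fill (recursive_loop calling itself for every discovered neighbour) is replaced by an iterative one: each component is grown with an explicit stack, and the six bounded neighbours come from one data table instead of a chain of six if-statements.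
import Mathlib
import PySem

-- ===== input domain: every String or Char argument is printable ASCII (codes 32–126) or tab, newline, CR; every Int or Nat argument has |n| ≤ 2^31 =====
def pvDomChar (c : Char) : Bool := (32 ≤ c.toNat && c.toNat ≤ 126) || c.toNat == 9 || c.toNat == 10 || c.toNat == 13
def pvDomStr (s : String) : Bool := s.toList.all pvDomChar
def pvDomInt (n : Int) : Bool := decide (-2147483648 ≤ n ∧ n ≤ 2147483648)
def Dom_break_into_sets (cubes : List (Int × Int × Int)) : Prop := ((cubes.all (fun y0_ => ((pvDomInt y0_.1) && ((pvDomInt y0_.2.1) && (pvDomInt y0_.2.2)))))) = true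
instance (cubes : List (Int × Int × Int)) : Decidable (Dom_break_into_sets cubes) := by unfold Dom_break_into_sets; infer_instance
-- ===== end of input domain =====

-- B replaces A's recursive flood fill by an iterative one with an explicit stack (and a
-- table-driven neighbour helper); same return value. Both Pythons empty the argument set
-- in place (the equivalence proved here is about the return value; the mutation is identical).
-- Python's set iteration/pop order is arbitrary; both ports fix the same deterministic order
-- (pop = first element, neighbours in axis order), which is sound because the result is a
-- list of sets compared canonically. All fuel parameters below are totality guards only:
-- each loop is given enough fuel that the 0 branch is never reached (proved in the lemmas).

-- ===== PORT A =====
def get_neighbours (location : Int × Int × Int) : List (Int × Int × Int) :=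
  let x := location.1
  let y := location.2.1
  let z := location.2.2
  let neighbours : List (Int × Int × Int) := PySem.Set.empty
  let neighbours := if x > -1 then PySem.Set.add neighbours (x - 1, y, z) else neighbours
  let neighbours := if x < 23 then PySem.Set.add neighbours (x + 1, y, z) else neighbours
  let neighbours := if y > -1 then PySem.Set.add neighbours (x, y - 1, z) else neighbours
  let neighbours := if y < 23 then PySem.Set.add neighbours (x, y + 1, z) else neighbours
  let neighbours := if z > -1 then PySem.Set.add neighbours (x, y, z - 1) else neighbours
  let neighbours := if z < 23 then PySem.Set.add neighbours (x, y, z + 1) else neighbours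
  neighbours

def find_neighbours_in_set (cube_of_interest : Int × Int × Int)
    (set_of_cubes : List (Int × Int × Int)) : List (Int × Int × Int) :=
  PySem.Set.inter (get_neighbours cube_of_interest) set_of_cubes

def recursive_loop (fuel : Nat) (current_set cubes : List (Int × Int × Int))
    (current_cube : Int × Int × Int) :
    List (Int × Int × Int) × List (Int × Int × Int) :=
  match fuel with
  | 0 => (current_set, cubes)
  | fuel + 1 =>
    let neighbours := find_neighbours_in_set current_cube cubes
    let current_set := PySem.Set.update current_set neighbours
    let cubes := PySem.Set.diff cubes neighbours
    neighbours.foldl (fun st n => recursive_loop fuel st.1 st.2 n) (current_set, cubes)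

-- the while loop: every iteration pops one cube, so cubes.length iterations always suffice
def break_loop (fuel : Nat) (cubes : List (Int × Int × Int)) : List (List (Int × Int × Int)) :=
  match fuel with
  | 0 => []
  | fuel + 1 =>
    match cubes with
    | [] => []
    | current_cube :: cubes =>        -- cubes.pop() modelled as taking the first element
      let r := recursive_loop (cubes.length + 1)
        (PySem.Set.ofList [current_cube]) cubes current_cube
      r.1 :: break_loop fuel r.2

def break_into_sets (cubes : List (Int × Int × Int)) : List (List (Int × Int × Int)) :=
  break_loop cubes.length cubes

-- ===== PORT B =====
def bounded_neighbours (cube : Int × Int × Int) : List (Int × Int × Int) :=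
  -- the Python table, with field access instead of tuple unpacking
  ([((cube.1 - 1, cube.2.1, cube.2.2), (cube.1 - 1, true)),
    ((cube.1 + 1, cube.2.1, cube.2.2), (cube.1 + 1, false)),
    ((cube.1, cube.2.1 - 1, cube.2.2), (cube.2.1 - 1, true)),
    ((cube.1, cube.2.1 + 1, cube.2.2), (cube.2.1 + 1, false)),
    ((cube.1, cube.2.1, cube.2.2 - 1), (cube.2.2 - 1, true)),
    ((cube.1, cube.2.1, cube.2.2 + 1), (cube.2.2 + 1, false))] :
      List ((Int × Int × Int) × Int × Bool)).foldl
    (fun out e => if (if e.2.2 then -1 ≤ e.2.1 else e.2.1 ≤ 23)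
                  then PySem.Set.add out e.1 else out)
    PySem.Set.empty

-- the inner while loop: each pop either shrinks the pool or only shortens the stack,
-- so cubes.length + stack.length iterations always suffice
def flood (fuel : Nat) (component cubes : List (Int × Int × Int))
    (stack : List (Int × Int × Int)) :
    List (Int × Int × Int) × List (Int × Int × Int) :=
  match fuel with
  | 0 => (component, cubes)
  | fuel + 1 =>
    match stack with
    | [] => (component, cubes)
    | cube :: rest =>
      -- Python pops from the end of `stack` and extends with reversed(found);
      -- the port keeps the stack reversed (top = head), so pop = head, push = found ++ rest
      let found := (bounded_neighbours cube).filter (fun nb => PySem.Set.contains cubes nb)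
      flood fuel (PySem.Set.update component found) (PySem.Set.diff cubes found) (found ++ rest)

def alt_loop (fuel : Nat) (cubes : List (Int × Int × Int)) : List (List (Int × Int × Int)) :=
  match fuel with
  | 0 => []
  | fuel + 1 =>
    match cubes with
    | [] => []
    | seed :: pool =>                 -- cubes.pop() modelled as taking the first element
      let r := flood (pool.length + 1) (PySem.Set.ofList [seed]) pool [seed]
      r.1 :: alt_loop fuel r.2

def break_into_sets_alt (cubes : List (Int × Int × Int)) : List (List (Int × Int × Int)) :=
  alt_loop cubes.length cubes

-- ===== PRECONDITION & SPEC =====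
def Spec_break_into_sets (cubes : List (Int × Int × Int)) (out : List (List (Int × Int × Int))) : Prop := out = break_into_sets_alt cubes
instance (cubes : List (Int × Int × Int)) (out : List (List (Int × Int × Int))) : Decidable (Spec_break_into_sets cubes out) := by unfold Spec_break_into_sets; infer_instance

-- ===== CLAIM (what is proved, stated in full; the proofs are below) =====
def Claim_equal_break_into_sets : Prop := ∀ (cubes : List (Int × Int × Int)), Dom_break_into_sets cubes → Spec_break_into_sets cubes (break_into_sets cubes)

-- ===== LEMMAS AND PROOFS =====

-- A's per-node step with the fuel break_loop hands it.
def stepA (st : List (Int × Int × Int) × List (Int × Int × Int))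
    (c : Int × Int × Int) : List (Int × Int × Int) × List (Int × Int × Int) :=
  recursive_loop (st.2.length + 1) st.1 st.2 c

lemma recursive_loop_len (fuel : Nat) :
    ∀ (cs cubes : List (Int × Int × Int)) (c : Int × Int × Int),
      ((recursive_loop fuel cs cubes c).2).length ≤ cubes.length := by
  induction fuel with
  | zero => intro cs cubes c; simp [recursive_loop]
  | succ f ih =>
    intro cs cubes c
    have hfold : ∀ (ns : List (Int × Int × Int))
        (st : List (Int × Int × Int) × List (Int × Int × Int)),
        ((ns.foldl (fun st n => recursive_loop f st.1 st.2 n) st).2).length ≤ st.2.length := by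
      intro ns
      induction ns with
      | nil => intro st; simp
      | cons n t iht =>
        intro st
        exact le_trans (iht _) (ih _ _ _)
    simp only [recursive_loop]
    exact le_trans (hfold _ _) (List.length_filter_le _ _)

lemma bounded_neighbours_nodup (cube : Int × Int × Int) :
    (bounded_neighbours cube).Nodup := by
  have hstep : ∀ (s : List (Int × Int × Int)) (c : Prop) [Decidable c]
      (v : Int × Int × Int), s.Nodup → (if c then PySem.Set.add s v else s).Nodup := by
    intro s c _ v hs
    split
    · exact PySem.Set.nodup_add s v hs
    · exact hs
  simp only [bounded_neighbours, List.foldl]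
  exact hstep _ _ _ (hstep _ _ _ (hstep _ _ _ (hstep _ _ _ (hstep _ _ _
    (hstep _ _ _ List.nodup_nil)))))

-- removing the freshly found cubes from the pool pays for pushing them onto the stack
lemma diff_len_add (found : List (Int × Int × Int)) :
    ∀ (cubes : List (Int × Int × Int)), found.Nodup → (∀ x ∈ found, x ∈ cubes) →
      (PySem.Set.diff cubes found).length + found.length ≤ cubes.length := by
  induction found with
  | nil => intro cubes _ _; simp [PySem.Set.diff]
  | cons f t ih =>
    intro cubes hnd hsub
    have hf : f ∈ cubes := hsub f (by simp)
    have h1 : (PySem.Set.diff cubes (f :: t))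
        = PySem.Set.diff (cubes.filter (fun x => !(x == f))) t := by
      simp only [PySem.Set.diff, List.filter_filter]
      apply List.filter_congr
      intro x _
      simp [Bool.not_or, Bool.and_comm, beq_eq_decide]
    have h2 : (cubes.filter (fun x => !(x == f))).length < cubes.length := by
      apply List.length_filter_lt_length_iff_exists.mpr
      exact ⟨f, hf, by simp⟩
    have h3 := ih (cubes.filter (fun x => !(x == f))) hnd.of_cons (by
      intro x hx
      refine List.mem_filter.mpr ⟨hsub x (by simp [hx]), ?_⟩
      have : x ≠ f := fun h => (List.nodup_cons.mp hnd).1 (h ▸ hx)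
      simp [this])
    rw [h1]
    simp only [List.length_cons]
    omega

-- A's if-chain and B's table produce the same neighbour list.
lemma bounded_eq_get (c : Int × Int × Int) :
    bounded_neighbours c = get_neighbours c := by
  obtain ⟨x, y, z⟩ := c
  simp only [bounded_neighbours, get_neighbours, List.foldl, Bool.false_eq_true, if_true, if_false,
    show (-1 ≤ x - 1 ↔ x > -1) from by omega,
    show (x + 1 ≤ 23 ↔ x < 23) from by omega,
    show (-1 ≤ y - 1 ↔ y > -1) from by omega,
    show (y + 1 ≤ 23 ↔ y < 23) from by omega,
    show (-1 ≤ z - 1 ↔ z > -1) from by omega,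
    show (z + 1 ≤ 23 ↔ z < 23) from by omega]

lemma diff_len_lt (cubes ns : List (Int × Int × Int)) (x : Int × Int × Int)
    (hx : x ∈ ns) (hxc : x ∈ cubes) :
    (PySem.Set.diff cubes ns).length < cubes.length := by
  apply List.length_filter_lt_length_iff_exists.mpr
  exact ⟨x, hxc, by simp [PySem.Set.contains, hx]⟩

-- fuel irrelevance: any fuel above the pool size computes the same result
lemma recursive_loop_fuel : ∀ (n : Nat) (cubes : List (Int × Int × Int)),
    cubes.length ≤ n → ∀ (f g : Nat) (cs : List (Int × Int × Int)) (c : Int × Int × Int),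
    cubes.length < f → cubes.length < g →
    recursive_loop f cs cubes c = recursive_loop g cs cubes c := by
  intro n
  induction n with
  | zero =>
    intro cubes hlen f g cs c hf hg
    have hc : cubes = [] := List.length_eq_zero_iff.mp (Nat.le_zero.mp hlen)
    subst hc
    obtain ⟨f', rfl⟩ := Nat.exists_eq_add_of_lt hf
    obtain ⟨g', rfl⟩ := Nat.exists_eq_add_of_lt hg
    simp [recursive_loop, PySem.Set.inter, find_neighbours_in_set, PySem.Set.diff]
  | succ n ih =>
    intro cubes hlen f g cs c hf hg
    match f, g with
    | f' + 1, g' + 1 =>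
      simp only [recursive_loop]
      set ns := find_neighbours_in_set c cubes with hns
      rcases List.eq_nil_or_concat ns with h | ⟨w, x, hx⟩
      · simp [h]
      · have hxmem : x ∈ ns := by rw [hx]; simp
        have hxc : x ∈ cubes := by
          have h2 : x ∈ (get_neighbours c).filter (fun v => PySem.Set.contains cubes v) := by
            simpa [hns, find_neighbours_in_set, PySem.Set.inter] using hxmem
          simpa [PySem.Set.contains] using (List.mem_filter.mp h2).2
        have hlt : (PySem.Set.diff cubes ns).length < cubes.length :=
          diff_len_lt cubes ns x hxmem hxc
        have hfold : ∀ (t : List (Int × Int × Int))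
            (st : List (Int × Int × Int) × List (Int × Int × Int)),
            st.2.length ≤ (PySem.Set.diff cubes ns).length →
            t.foldl (fun st n => recursive_loop f' st.1 st.2 n) st
              = t.foldl (fun st n => recursive_loop g' st.1 st.2 n) st := by
          intro t
          induction t with
          | nil => intro st _; rfl
          | cons m r ihr =>
            intro st hst
            have hb : st.2.length ≤ n := by omega
            have h1 : recursive_loop f' st.1 st.2 m = recursive_loop g' st.1 st.2 m :=
              ih st.2 hb f' g' st.1 m (by omega) (by omega)
            simp only [List.foldl_cons, h1]
            apply ihr
            exact le_trans (recursive_loop_len g' _ _ _) hst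
        exact hfold ns _ (le_refl _)

-- the iterative stack loop is the fold of A's recursive step over the stack
lemma flood_eq_foldl : ∀ (fuel : Nat) (component cubes stack : List (Int × Int × Int)),
    cubes.length + stack.length ≤ fuel →
    flood fuel component cubes stack = stack.foldl stepA (component, cubes) := by
  intro fuel
  induction fuel with
  | zero =>
    intro component cubes stack hlen
    have : stack = [] := List.length_eq_zero_iff.mp (by omega)
    subst this
    rfl
  | succ fuel ih =>
    intro component cubes stack hlen
    match stack with
    | [] => rfl
    | cube :: rest =>
      simp only [flood]
      set found := (bounded_neighbours cube).filter
        (fun nb => PySem.Set.contains cubes nb) with hfound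
      have hnd : found.Nodup := (bounded_neighbours_nodup cube).filter _
      have hsub : ∀ x ∈ found, x ∈ cubes := by
        intro x hx
        have := (List.mem_filter.mp hx).2
        simpa [PySem.Set.contains] using this
      have hpay := diff_len_add found cubes hnd hsub
      rw [ih _ _ _ (by
        simp only [List.length_append, List.length_cons] at hlen ⊢
        omega)]
      rw [List.foldl_append, List.foldl_cons]
      congr 1
      -- stepA (component, cubes) cube = found.foldl stepA (component', cubes')
      have hfe : find_neighbours_in_set cube cubes = found := by
        simp [find_neighbours_in_set, PySem.Set.inter, bounded_eq_get, hfound, PySem.Set.contains]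
      show found.foldl stepA
          (PySem.Set.update component found, PySem.Set.diff cubes found)
        = recursive_loop (cubes.length + 1) component cubes cube
      simp only [recursive_loop, hfe]
      rcases List.eq_nil_or_concat found with h | ⟨w, x, hx⟩
      · simp [h]
      · have hxmem : x ∈ found := by rw [hx]; simp
        have hxc : x ∈ cubes := hsub x hxmem
        have hlt : (PySem.Set.diff cubes found).length < cubes.length :=
          diff_len_lt cubes found x hxmem hxc
        have hfold : ∀ (t : List (Int × Int × Int))
            (st : List (Int × Int × Int) × List (Int × Int × Int)),
            st.2.length ≤ (PySem.Set.diff cubes found).length →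
            t.foldl stepA st
              = t.foldl (fun st n => recursive_loop cubes.length st.1 st.2 n) st := by
          intro t
          induction t with
          | nil => intro st _; rfl
          | cons m r ihr =>
            intro st hst
            have h1 : stepA st m = recursive_loop cubes.length st.1 st.2 m :=
              recursive_loop_fuel st.2.length st.2 (le_refl _)
                (st.2.length + 1) cubes.length st.1 m (by omega) (by omega)
            simp only [List.foldl_cons, h1]
            apply ihr
            exact le_trans (recursive_loop_len cubes.length _ _ _) hst
        exact hfold found _ (le_refl _)

-- the two outer while loops agree step by step
lemma loops_eq : ∀ (fuel : Nat) (cubes : List (Int × Int × Int)),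
    cubes.length ≤ fuel → break_loop fuel cubes = alt_loop fuel cubes := by
  intro fuel
  induction fuel with
  | zero => intro cubes _; rfl
  | succ fuel ih =>
    intro cubes hlen
    match cubes with
    | [] => rfl
    | c :: rest =>
      simp only [break_loop, alt_loop]
      have h : flood (rest.length + 1) (PySem.Set.ofList [c]) rest [c]
          = recursive_loop (rest.length + 1) (PySem.Set.ofList [c]) rest c := by
        rw [flood_eq_foldl (rest.length + 1) _ _ _ (by simp)]
        rfl
      rw [h]
      have hlen2 : (recursive_loop (rest.length + 1) (PySem.Set.ofList [c]) rest c).2.length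
          ≤ fuel := by
        have := recursive_loop_len (rest.length + 1) (PySem.Set.ofList [c]) rest c
        simp only [List.length_cons] at hlen
        omega
      rw [ih _ hlen2]

-- ===== VERDICT (by name: the statement is the Claim_ definition above) =====
theorem break_into_sets_spec : Claim_equal_break_into_sets := by
  intro cubes _
  unfold Spec_break_into_sets break_into_sets break_into_sets_alt
  exact loops_eq cubes.length cubes (le_refl _)
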